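-- pv_equiv track=rewrite | github.com/981377660LMT/algorithm-study | leetcode/423/3.py | solve
-- ===== SOURCE A (Python) =====
-- from functools import lru_cache
-- from typing import List, Tuple, Optional
--
-- MOD = int(1e9 + 7)
--
-- def solve(digits: List[int], c: int) -> int:
--     n = len(digits)
--
--     @lru_cache(None)
--     def dfs(pos: int, count: int, isLimit: bool, isNum: bool) -> int:
--         if count > c:
--             return 0
--         if pos == n:
--             return int(isNum and count == c)
--         res = 0
--         upper = digits[pos] if isLimit else 1
--         for digit in range(upper + 1):
--             nextLimit = isLimit and (digit == upper)
--             nextIsNum = isNum or digit != 0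
--             nextCount = count + digit if nextIsNum else count
--             res = (res + dfs(pos + 1, nextCount, nextLimit, nextIsNum)) % MOD
--         return res
--
--     res = dfs(0, 0, True, False)
--     dfs.cache_clear()
--     return res
-- ===== SOURCE B (Python) =====
-- MOD = int(1e9 + 7)
--
-- def solve(digits, c):
--     n = len(digits)
--
--     def comb(m, r):
--         # binomial coefficient, 0 outside 0 <= r <= m
--         if r < 0 or r > m:
--             return 0
--         num = 1
--         den = 1
--         for i in range(r):
--             num *= m - i
--             den *= i + 1
--         return num // den
--
--     total = 0
--     s = 0  # digit sum of the prefix kept equal to the bound so far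
--     for p, u in enumerate(digits):
--         m = n - p - 1  # free binary positions after dropping below the bound at position p
--         lo = max(0, c - s - (u - 1))
--         hi = min(m, c - s)
--         for r in range(lo, hi + 1):
--             total += comb(m, r)
--         if u >= 1 and s == 0 and c == 0:
--             total -= 1  # the all-zero string is the number 0, which is not counted
--         s += u
--     if s == c and s > 0:
--         total += 1  # the bound itself
--     return total % MOD
-- ===== Notes on version B (the rewrite author's own statement) =====
-- stated objective: alternative
-- what changed: Replaces A's memoized top-down digit-DP recursion over (pos,count,isLimit,isNum) states by a single left-to-right scan that, for each position where the number first drops below the bound, adds a closed-form binomial count of the free binary tails with the required number of ones; Pre_ excludes lists containing a negative digit (not a digit list at all), where A's range(upper+1) is silently empty and kills the limit path.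
-- outside the precondition, e.g. on solve([-1, 1, 1], 1): A returns 0, B returns 1
import Mathlib
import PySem

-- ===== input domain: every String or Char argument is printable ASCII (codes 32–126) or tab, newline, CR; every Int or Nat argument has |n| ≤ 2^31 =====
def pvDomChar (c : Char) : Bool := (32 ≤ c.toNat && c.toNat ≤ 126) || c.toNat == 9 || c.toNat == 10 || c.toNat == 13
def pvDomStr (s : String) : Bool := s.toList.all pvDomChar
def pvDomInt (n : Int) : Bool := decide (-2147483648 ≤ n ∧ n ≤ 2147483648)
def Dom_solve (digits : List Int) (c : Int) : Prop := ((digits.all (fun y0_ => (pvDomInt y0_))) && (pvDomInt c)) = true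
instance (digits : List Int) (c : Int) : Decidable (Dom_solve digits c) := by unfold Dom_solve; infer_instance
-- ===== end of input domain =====

-- B replaces A's memoized digit-DP recursion by a direct combinatorial scan: for each
-- position where the number first drops below the bound, it adds the binomial count of
-- free binary tails with the right number of ones (objective: alternative algorithm).

-- ===== PORT A =====
def pvMOD : Int := 1000000007

-- literal port of A's inner dfs; lru_cache is only memoization, the values are identical.
-- digits[pos] is read as the head of the remaining suffix (pos is always in range in A).
def dfsA (c : Int) (rest : List Int) (count : Int) (isLimit isNum : Bool) : Int :=
  if count > c then 0
  else
    match rest with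
    | [] => if isNum && count == c then 1 else 0
    | d0 :: rest' =>
      let upper := if isLimit then d0 else 1
      (PySem.List.pyRange 0 (upper + 1) 1).foldl
        (fun res digit =>
          let nextLimit := isLimit && (digit == upper)
          let nextIsNum := isNum || !(digit == 0)
          let nextCount := if nextIsNum then count + digit else count
          (res + dfsA c rest' nextCount nextLimit nextIsNum) % pvMOD) 0

def solve (digits : List Int) (c : Int) : Int :=
  dfsA c digits 0 true false

-- ===== PORT B =====
-- binomial coefficient by the multiplicative formula (Source B's comb)
def combB (m r : Int) : Int :=
  if r < 0 || r > m then 0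
  else
    let nd := (PySem.List.pyRange 0 r 1).foldl
      (fun (p : Int × Int) i => (p.1 * (m - i), p.2 * (i + 1))) (1, 1)
    PySem.Int.floordiv nd.1 nd.2

-- Source B's main loop
def loopB (c n : Int) : List Int → Int → Int → Int → Int
  | [], _, s, total => if s == c && s > 0 then (total + 1) % pvMOD else total % pvMOD
  | u :: rest, p, s, total =>
    let m := n - p - 1
    let lo := max 0 (c - s - (u - 1))
    let hi := min m (c - s)
    let total1 := (PySem.List.pyRange lo (hi + 1) 1).foldl (fun t r => t + combB m r) total
    let total2 := if u ≥ 1 && s == 0 && c == 0 then total1 - 1 else total1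
    loopB c n rest (p + 1) (s + u) total2

def solve_alt (digits : List Int) (c : Int) : Int :=
  loopB c (digits.length : Int) digits 0 0 0

-- ===== PRECONDITION & SPEC =====
-- Pre_ excludes lists containing a negative digit (not a digit list at all): there A's
-- range(upper+1) is silently empty and kills the whole limit path, an accident of the
-- implementation that B's closed-form scan has no reason to reproduce.
def Pre_solve (digits : List Int) (c : Int) : Prop := ∀ d ∈ digits, 0 ≤ d
instance (digits : List Int) (c : Int) : Decidable (Pre_solve digits c) := by unfold Pre_solve; infer_instance

def pvWitness_solve : List Int × Int := ([1, 0, 1], 2)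

def Spec_solve (digits : List Int) (c : Int) (out : Int) : Prop := out = solve_alt digits c
instance (digits : List Int) (c : Int) (out : Int) : Decidable (Spec_solve digits c out) := by unfold Spec_solve; infer_instance

-- ===== CLAIM (what is proved, stated in full; the proofs are below) =====
def Claim_equal_solve : Prop := ∀ (digits : List Int) (c : Int), Dom_solve digits c → Pre_solve digits c → Spec_solve digits c (solve digits c)

-- ===== LEMMAS AND PROOFS =====

-- the exact (unreduced) count of free binary tails of length m with r ones
def Fc (m : Nat) (r : Int) : Int := if 0 ≤ r ∧ r ≤ m then (Nat.choose m r.toNat : Int) else 0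

def Gc (m : Nat) (r : Int) (b : Bool) : Int := Fc m r - (if b = false ∧ r = 0 then 1 else 0)

def Lc : List Int → Int → Bool → Int
  | [], r, b => if b = true ∧ r = 0 then 1 else 0
  | u :: rest, r, b =>
    if u < 0 then 0
    else ((PySem.List.pyRange 0 u 1).map
            (fun d => Gc rest.length (r - d) (b || !(d == 0)))).sum
         + Lc rest (r - u) (b || !(u == 0))

theorem Fc_neg {m : Nat} {r : Int} (h : r < 0) : Fc m r = 0 := by simp [Fc]; omega

theorem Gc_neg {m : Nat} {r : Int} {b : Bool} (h : r < 0) : Gc m r b = 0 := by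
  simp [Gc, Fc_neg h]; omega

theorem Fc_gt {m : Nat} {r : Int} (h : (m : Int) < r) : Fc m r = 0 := by
  simp [Fc]; omega

theorem Lc_neg : ∀ (rest : List Int) (r : Int) (b : Bool), r < 0 → Lc rest r b = 0 := by
  intro rest
  induction rest with
  | nil => intro r b h; simp [Lc]; omega
  | cons u rest ih =>
    intro r b h
    simp only [Lc]
    split
    · rfl
    · rename_i hu
      rw [ih (r - u) _ (by omega)]
      rw [List.sum_eq_zero]
      · ring
      · intro x hx
        simp only [List.mem_map] at hx
        obtain ⟨d, hd, rfl⟩ := hx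
        rw [PySem.List.mem_pyRange_one] at hd
        exact Gc_neg (by omega)

theorem Gc_pascal (m : Nat) (r : Int) (b : Bool) :
    Gc (m + 1) r b = Gc m r b + Gc m (r - 1) true := by
  have hF : Fc (m + 1) r = Fc m r + Fc m (r - 1) := by
    unfold Fc
    by_cases h0 : r < 0
    · rw [if_neg (by omega), if_neg (by omega), if_neg (by omega)]; ring
    · by_cases h1 : r = 0
      · subst h1
        rw [if_pos (by constructor <;> positivity), if_pos (by constructor <;> positivity), if_neg (by omega)]
        norm_num
      · by_cases h2 : r ≤ m
        · rw [if_pos (by push_cast; omega), if_pos (by push_cast; omega), if_pos (by push_cast; omega)]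
          have hk : r.toNat = (r - 1).toNat + 1 := by omega
          rw [hk, Nat.choose_succ_succ]
          push_cast
          ring
        · by_cases h3 : r = m + 1
          · rw [if_pos (by push_cast; omega), if_neg (by push_cast; omega), if_pos (by push_cast; omega)]
            have : r.toNat = m + 1 := by omega
            have h4 : (r - 1).toNat = m := by omega
            rw [this, h4]
            simp
          · rw [if_neg (by push_cast; omega), if_neg (by push_cast; omega), if_neg (by push_cast; omega)]; ring
  unfold Gc
  rw [hF]
  have h2 : (if true = false ∧ r - 1 = 0 then (1:Int) else 0) = 0 := by simp
  rw [h2]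
  ring

theorem combB_fold (m : Nat) : ∀ (k : Nat), k ≤ m →
    (PySem.List.pyRange 0 (k : Int) 1).foldl
      (fun (p : Int × Int) i => (p.1 * ((m : Int) - i), p.2 * (i + 1))) (1, 1)
      = (((k.factorial * m.choose k : Nat) : Int), ((k.factorial : Nat) : Int)) := by
  intro k
  induction k with
  | zero => intro _; simp [PySem.List.pyRange_one_eq_nil]
  | succ k ih =>
    intro hk
    have h1 : ((k : Int) + 1) = ((k + 1 : Nat) : Int) := by push_cast; ring
    rw [← h1, PySem.List.pyRange_one_succ_right (by positivity), List.foldl_append,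
      ih (by omega)]
    simp only [List.foldl_cons, List.foldl_nil, Prod.mk.injEq]
    constructor
    · have h2 : ((m : Int) - k) = ((m - k : Nat) : Int) := by push_cast [Nat.cast_sub (by omega : k ≤ m)]; ring
      rw [h2, ← Nat.cast_mul]
      congr 1
      rw [Nat.factorial_succ]
      have h3 := Nat.choose_succ_right_eq m k
      calc k.factorial * m.choose k * (m - k) = k.factorial * (m.choose k * (m - k)) := by ring
        _ = k.factorial * (m.choose (k+1) * (k+1)) := by rw [h3]
        _ = (k+1) * k.factorial * m.choose (k+1) := by ring
    · rw [Nat.factorial_succ]; push_cast; ring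

theorem combB_eq_Fc (m : Nat) (r : Int) : combB (m : Int) r = Fc m r := by
  unfold combB Fc
  by_cases h : 0 ≤ r ∧ r ≤ m
  · obtain ⟨k, rfl⟩ : ∃ k : Nat, r = (k : Int) := ⟨r.toNat, by omega⟩
    rw [if_neg (by simp only [Bool.or_eq_true, decide_eq_true_eq, not_or]; omega), if_pos h]
    rw [combB_fold m k (by exact_mod_cast h.2)]
    rw [Int.toNat_natCast]
    show PySem.Int.floordiv ((k.factorial * m.choose k : Nat) : Int) ((k.factorial : Nat) : Int) = _
    rw [PySem.Int.floordiv_eq_ediv_of_pos (by exact_mod_cast Nat.factorial_pos k)]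
    rw [Int.natCast_mul (k.factorial), Int.mul_ediv_cancel_left]
    exact_mod_cast (Nat.factorial_pos k).ne'
  · rw [if_pos (by simp only [Bool.or_eq_true, decide_eq_true_eq]; omega), if_neg h]

theorem foldl_mod (f g : Int → Int) :
    ∀ (l : List Int) (a : Int), (∀ x ∈ l, f x = g x % pvMOD) →
      l.foldl (fun res x => (res + f x) % pvMOD) (a % pvMOD) = (a + (l.map g).sum) % pvMOD := by
  intro l
  induction l with
  | nil => intro a _; simp
  | cons x l ih =>
    intro a h
    simp only [List.foldl_cons, List.map_cons, List.sum_cons]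
    rw [h x (by simp), ← Int.add_emod, ih (a + g x) (fun y hy => h y (by simp [hy]))]
    ring_nf

theorem sum_pyRange_Icc (f : Int → Int) (a b : Int) :
    ((PySem.List.pyRange a b 1).map f).sum = ∑ r ∈ Finset.Icc a (b - 1), f r := by
  by_cases h : b ≤ a
  · rw [PySem.List.pyRange_one_eq_nil h, Finset.Icc_eq_empty (by omega : ¬ a ≤ b - 1)]
    simp
  · rw [PySem.List.pyRange_one_cons (by omega)]
    rw [← Finset.insert_Icc_succ_left_eq_Icc (show a ≤ b - 1 by omega)]
    have hsucc : Order.succ a = a + 1 := rfl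
    rw [Finset.sum_insert (by rw [hsucc]; simp)]
    rw [List.map_cons, List.sum_cons, sum_pyRange_Icc f (a + 1) b, hsucc]
termination_by (b - a).toNat
decreasing_by omega

theorem dfsA_nil (c count : Int) (isLimit isNum : Bool) :
    dfsA c [] count isLimit isNum = Gc 0 (c - count) isNum % pvMOD := by
  unfold dfsA Gc Fc
  have hM : (0:Int) % pvMOD = 0 := Int.zero_emod _
  cases isNum <;> split_ifs <;> simp_all [pvMOD] <;> omega

theorem dfsA_free (c : Int) : ∀ (rest : List Int) (count : Int) (isNum : Bool),
    dfsA c rest count false isNum = Gc rest.length (c - count) isNum % pvMOD := by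
  intro rest
  induction rest with
  | nil => intro count isNum; exact dfsA_nil c count false isNum
  | cons u rest ih =>
    intro count isNum
    rw [dfsA]
    by_cases hc : count > c
    · rw [if_pos hc, Gc_neg (by omega), Int.zero_emod]
    · rw [if_neg hc]
      simp only [if_neg (by simp : ¬ (false = true))]
      have hr : PySem.List.pyRange 0 (1 + 1) 1 = [0, 1] := by decide
      rw [hr]
      simp only [List.foldl_cons, List.foldl_nil, Bool.false_and, Bool.or_false,
        beq_self_eq_true, not_true, Bool.not_true]
      norm_num
      simp only [show ((1:Int) == 0) = false from rfl, Bool.not_false, Bool.or_true]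
      rw [ih count isNum, ih (count + 1) true]
      rw [← Int.add_emod]
      rw [Gc_pascal, show c - (count + 1) = c - count - 1 from by ring]

theorem Lc_nil (r : Int) (b : Bool) : Lc [] r b = Gc 0 r b := by
  unfold Lc Gc Fc
  cases b <;> split_ifs <;> simp_all <;> omega

theorem dfsA_limit (c : Int) : ∀ (rest : List Int) (count : Int) (isNum : Bool),
    dfsA c rest count true isNum = Lc rest (c - count) isNum % pvMOD := by
  intro rest
  induction rest with
  | nil => intro count isNum; rw [dfsA_nil c count true isNum, Lc_nil]
  | cons u rest ih =>
    intro count isNum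
    rw [dfsA]
    by_cases hc : count > c
    · rw [if_pos hc, Lc_neg _ _ _ (by omega), Int.zero_emod]
    · rw [if_neg hc]
      simp only [if_true]
      by_cases hu : u < 0
      · rw [PySem.List.pyRange_one_eq_nil (by omega)]
        rw [Lc]
        rw [if_pos hu, Int.zero_emod]
        rfl
      · have hfg : ∀ x ∈ PySem.List.pyRange 0 (u + 1) 1,
            (fun digit => dfsA c rest
              (if (isNum || !(digit == 0)) = true then count + digit else count)
              (true && (digit == u)) (isNum || !(digit == 0))) x
            = (fun d => if d == u then Lc rest (c - count - u) (isNum || !(u == 0))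
                else Gc rest.length (c - count - d) (isNum || !(d == 0))) x % pvMOD := by
          intro x hx
          rw [PySem.List.mem_pyRange_one] at hx
          by_cases hxu : x = u
          · subst hxu
            simp only [beq_self_eq_true, Bool.and_true, if_pos]
            rw [ih]
            by_cases hx0 : x = 0
            · subst hx0
              cases isNum <;> simp
            · have hb : (x == 0) = false := by simp [hx0]
              simp only [hb, Bool.not_false, Bool.or_true, if_pos]
              rw [show c - (count + x) = c - count - x from by ring]
          · have hbu : (x == u) = false := by simp [hxu]
            simp only [hbu, Bool.and_false, if_neg, Bool.false_eq_true, not_false_iff]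
            rw [dfsA_free]
            by_cases hx0 : x = 0
            · subst hx0
              cases isNum <;> simp
            · have hb : (x == 0) = false := by simp [hx0]
              simp only [hb, Bool.not_false, Bool.or_true, if_pos]
              rw [show c - (count + x) = c - count - x from by ring]
        have hthis := foldl_mod _ _ (PySem.List.pyRange 0 (u + 1) 1) 0 hfg
        rw [Int.zero_emod, zero_add] at hthis
        rw [hthis]
        rw [PySem.List.pyRange_one_succ_right (by omega : (0:Int) ≤ u)]
        rw [List.map_append, List.sum_append]
        simp only [List.map_cons, List.map_nil, List.sum_cons, List.sum_nil,
          beq_self_eq_true, if_pos, add_zero]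
        rw [Lc, if_neg hu]
        have hmap : List.map (fun d => if (d == u) = true
              then Lc rest (c - count - u) (isNum || !(u == 0))
              else Gc rest.length (c - count - d) (isNum || !(d == 0)))
              (PySem.List.pyRange 0 u 1)
            = List.map (fun d => Gc rest.length (c - count - d) (isNum || !(d == 0)))
                (PySem.List.pyRange 0 u 1) := by
          apply List.map_congr_left
          intro d hd
          rw [PySem.List.mem_pyRange_one] at hd
          rw [if_neg (by simp; omega)]
        rw [hmap]

theorem sum_Fc_reindex (len : Nat) (R u : Int) :
    (∑ r ∈ Finset.Icc (max 0 (R - (u - 1))) (min (len : Int) R), Fc len r)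
      = ((PySem.List.pyRange 0 u 1).map (fun d => Fc len (R - d))).sum := by
  rw [sum_pyRange_Icc]
  rw [Finset.sum_subset (Finset.Icc_subset_Icc (by omega) (by omega) :
        Finset.Icc (max 0 (R - (u - 1))) (min (len : Int) R) ⊆ Finset.Icc (R - u + 1) R)
      (by intro x hx hnx
          rw [Finset.mem_Icc] at hx
          rw [Finset.mem_Icc, not_and_or] at hnx
          rcases hnx with h | h
          · exact Fc_neg (by omega)
          · exact Fc_gt (by omega))]
  exact Finset.sum_nbij' (i := fun r => R - r) (j := fun d => R - d)
    (by intro a ha; simp only [Finset.mem_Icc] at *; omega)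
    (by intro a ha; simp only [Finset.mem_Icc] at *; omega)
    (by intro a _; ring) (by intro a _; ring)
    (by intro a _; simp only []; rw [show R - (R - a) = a from by ring])

theorem sum_Gc_corr (len : Nat) (R u : Int) (b : Bool) :
    ((PySem.List.pyRange 0 u 1).map (fun d => Gc len (R - d) (b || !(d == 0)))).sum
      = ((PySem.List.pyRange 0 u 1).map (fun d => Fc len (R - d))).sum
        - (if 0 < u ∧ b = false ∧ R = 0 then 1 else 0) := by
  rw [sum_pyRange_Icc, sum_pyRange_Icc]
  have h1 : (∑ d ∈ Finset.Icc 0 (u - 1), Gc len (R - d) (b || !(d == 0)))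
      = ∑ d ∈ Finset.Icc 0 (u - 1),
          (Fc len (R - d) - (if d = 0 ∧ b = false ∧ R = 0 then 1 else 0)) := by
    refine Finset.sum_congr rfl (fun d hd => ?_)
    unfold Gc
    congr 1
    by_cases hd0 : d = 0 <;> by_cases hb : b = false <;> simp [hd0, hb] <;> omega
  rw [h1, Finset.sum_sub_distrib]
  congr 1
  by_cases hbR : b = false ∧ R = 0
  · have h2 : (∑ d ∈ Finset.Icc 0 (u - 1), (if d = 0 ∧ b = false ∧ R = 0 then (1:Int) else 0))
        = ∑ d ∈ Finset.Icc 0 (u - 1), (if d = 0 then (1:Int) else 0) := by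
      refine Finset.sum_congr rfl (fun d hd => ?_)
      by_cases hd0 : d = 0 <;> simp [hd0, hbR.1, hbR.2]
    rw [h2, Finset.sum_ite_eq' (Finset.Icc 0 (u - 1)) 0 (fun _ => (1:Int))]
    simp only [Finset.mem_Icc]
    by_cases hu1 : 0 < u
    · rw [if_pos ⟨le_rfl, by omega⟩, if_pos ⟨hu1, hbR.1, hbR.2⟩]
    · rw [if_neg (by omega), if_neg (by tauto)]
  · have h2 : (∑ d ∈ Finset.Icc 0 (u - 1), (if d = 0 ∧ b = false ∧ R = 0 then (1:Int) else 0)) = 0 := by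
      refine Finset.sum_eq_zero (fun d hd => ?_)
      rw [if_neg (by tauto)]
    rw [h2, if_neg (by tauto)]

theorem loopB_inv (c : Int) : ∀ (rest : List Int) (n p s total : Int),
    0 ≤ s → n = p + (rest.length : Int) → (∀ x ∈ rest, 0 ≤ x) →
    loopB c n rest p s total = (total + Lc rest (c - s) (decide (0 < s))) % pvMOD := by
  intro rest
  induction rest with
  | nil =>
    intro n p s total hs hn _
    rw [loopB, Lc]
    by_cases h : s = c ∧ 0 < s
    · rw [if_pos (by simp [h.1]; omega), if_pos ⟨by simp; omega, by omega⟩]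
    · rw [if_neg (by simp; omega), if_neg (by simp; omega), add_zero]
  | cons u rest ih =>
    intro n p s total hs hn hall
    have hu : ¬ u < 0 := by have := hall u (by simp); omega
    simp only [loopB]
    have hm : n - p - 1 = (rest.length : Int) := by
      simp only [List.length_cons] at hn; push_cast at hn ⊢; omega
    rw [ih n (p + 1) (s + u) _ (by omega)
      (by simp only [List.length_cons] at hn; push_cast at hn ⊢; omega)
      (fun x hx => hall x (by simp [hx]))]
    rw [Lc, if_neg hu]
    rw [PySem.List.foldl_add _ (fun r => combB (n - p - 1) r) total]
    have hmap : List.map (fun r => combB (n - p - 1) r)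
          (PySem.List.pyRange (max 0 (c - s - (u - 1))) (min (n - p - 1) (c - s) + 1) 1)
        = List.map (fun r => Fc rest.length r)
          (PySem.List.pyRange (max 0 (c - s - (u - 1))) (min (n - p - 1) (c - s) + 1) 1) :=
      List.map_congr_left (fun r _ => by simp only [hm, combB_eq_Fc])
    rw [hmap, hm]
    rw [sum_pyRange_Icc]
    rw [show min ((rest.length : Nat) : Int) (c - s) + 1 - 1 = min ((rest.length : Nat) : Int) (c - s) from by ring]
    rw [sum_Fc_reindex rest.length (c - s) u]
    rw [sum_Gc_corr rest.length (c - s) u (decide (0 < s))]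
    have hdec : decide (0 < s + u) = (decide (0 < s) || !(u == 0)) := by
      by_cases h1 : 0 < s
      · simp [h1, show 0 < s + u from by omega]
      · have hs0 : s = 0 := by omega
        by_cases h2 : u = 0
        · simp [hs0, h2]
        · simp [hs0, h2, show 0 < u from by omega]
    rw [hdec]
    rw [show c - (s + u) = c - s - u from by ring]
    by_cases hcorr : 0 < u ∧ s = 0 ∧ c = 0
    · rw [if_pos (by simp [hcorr.2.1, hcorr.2.2]; omega),
          if_pos ⟨hcorr.1, by simp; omega, by omega⟩]
      ring_nf
    · rw [if_neg (by simp; omega), if_neg (by rintro ⟨h1, h2, h3⟩; simp at h2; omega)]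
      ring_nf


-- ===== VERDICT (by name: the statement is the Claim_ definition above) =====
theorem solve_spec : Claim_equal_solve := by
  intro digits c _ hpre
  unfold Spec_solve solve solve_alt
  rw [dfsA_limit, loopB_inv c digits (digits.length : Int) 0 0 0 le_rfl (by simp) hpre]
  norm_num
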